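-- pv_equiv track=rewrite | github.com/repackedadmin/N4ughtyLLM-Gate | n4ughtyllm_gate/adapters/openai_compat/router.py | _obfuscate_preserving_structure
-- ===== SOURCE A (Python) =====
-- def _obfuscate_preserving_structure(text: str) -> str:
--     """Insert '-' every 3 non-whitespace chars while preserving layout."""
--     if not text:
--         return ""
--
--     parts: list[str] = []
--     token: list[str] = []
--
--     def _flush_token() -> None:
--         if not token:
--             return
--         value = "".join(token)
--         parts.append("-".join(value[i : i + 3] for i in range(0, len(value), 3)))
--         token.clear()
--
--     for ch in text:
--         if ch.isspace():
--             _flush_token()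
--             parts.append(ch)
--             continue
--         token.append(ch)
--     _flush_token()
--     return "".join(parts)
-- ===== SOURCE B (Python) =====
-- def _obfuscate_preserving_structure(text: str) -> str:
--     """Insert '-' every 3 non-whitespace chars while preserving layout."""
--     out: list[str] = []
--     count = 0
--     for ch in text:
--         if ch.isspace():
--             out.append(ch)
--             count = 0
--         else:
--             if count > 0 and count % 3 == 0:
--                 out.append("-")
--             out.append(ch)
--             count += 1
--     return "".join(out)
-- ===== Notes on version B (the rewrite author's own statement) =====
-- stated objective: simpler
-- what changed: Replaces the token-buffer-plus-flush structure (collect a run, then regroup it via range/slices and a hyphen join) by a single char-by-char pass that keeps only an integer count of non-whitespace chars in the current run and emits the hyphen inline when the count is a positive multiple of 3.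
import Mathlib
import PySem

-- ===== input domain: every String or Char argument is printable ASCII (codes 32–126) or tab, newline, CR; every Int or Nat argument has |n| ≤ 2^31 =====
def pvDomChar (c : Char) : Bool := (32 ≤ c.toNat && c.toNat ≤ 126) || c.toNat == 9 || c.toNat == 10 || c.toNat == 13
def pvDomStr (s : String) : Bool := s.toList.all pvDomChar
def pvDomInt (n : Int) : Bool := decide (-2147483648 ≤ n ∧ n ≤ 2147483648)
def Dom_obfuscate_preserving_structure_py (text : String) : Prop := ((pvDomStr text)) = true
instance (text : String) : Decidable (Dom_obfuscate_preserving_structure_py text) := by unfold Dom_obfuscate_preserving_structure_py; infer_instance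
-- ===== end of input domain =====

-- B replaces A's token-buffer-plus-flush (collect a run, regroup with range/slices, '-'.join)
-- by one char-by-char pass keeping only a counter of non-whitespace chars in the current run (simpler).

-- ===== PORT A =====
-- _flush_token: "-".join(value[i:i+3] for i in range(0, len(value), 3)), guarded by 'if not token'
def pvFlushA (token : List Char) : List (List Char) :=
  if token = [] then []
  else [PySem.Chars.join ['-'] ((PySem.List.pyRange 0 (token.length : Int) 3).map
        (fun i => PySem.List.slice token (some i) (some (i + 3))))]

def pvStepA (st : List (List Char) × List Char) (ch : Char) : List (List Char) × List Char :=
  if PySem.Chars.isspace ch then (st.1 ++ pvFlushA st.2 ++ [[ch]], [])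
  else (st.1, st.2 ++ [ch])

def obfuscate_preserving_structure_py (text : String) : String :=
  if text = "" then ""
  else
    let st := text.toList.foldl pvStepA ([], [])
    String.ofList ((st.1 ++ pvFlushA st.2).flatten)

-- ===== PORT B =====
def pvStepB (st : List Char × Nat) (ch : Char) : List Char × Nat :=
  if PySem.Chars.isspace ch then (st.1 ++ [ch], 0)
  else (st.1 ++ (if 0 < st.2 ∧ st.2 % 3 = 0 then ['-', ch] else [ch]), st.2 + 1)

def obfuscate_preserving_structure_py_alt (text : String) : String :=
  String.ofList (text.toList.foldl pvStepB ([], 0)).1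

-- ===== PRECONDITION & SPEC =====
def Spec_obfuscate_preserving_structure_py (text : String) (out : String) : Prop := out = obfuscate_preserving_structure_py_alt text
instance (text : String) (out : String) : Decidable (Spec_obfuscate_preserving_structure_py text out) := by unfold Spec_obfuscate_preserving_structure_py; infer_instance

-- ===== CLAIM (what is proved, stated in full; the proofs are below) =====
def Claim_equal_obfuscate_preserving_structure_py : Prop := ∀ (text : String), Dom_obfuscate_preserving_structure_py text → Spec_obfuscate_preserving_structure_py text (obfuscate_preserving_structure_py text)

-- ===== LEMMAS AND PROOFS =====

/-- Structural form of A's slice-based chunking. -/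
def pvChunk3 : List Char → List (List Char)
  | [] => []
  | c :: cs => ((c :: cs).take 3) :: pvChunk3 ((c :: cs).drop 3)
termination_by v => v.length
decreasing_by simp

lemma pvChunk3_nil : pvChunk3 [] = [] := by rw [pvChunk3.eq_def]

lemma pvChunk3_singleton (c : Char) : pvChunk3 [c] = [[c]] := by
  rw [pvChunk3.eq_def]; simp [pvChunk3_nil]

lemma pvFlushA_nil : pvFlushA [] = [] := by simp [pvFlushA]

lemma pvChunk3_cons (v : List Char) (h : v ≠ []) :
    pvChunk3 v = v.take 3 :: pvChunk3 (v.drop 3) := by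
  cases v with
  | nil => exact absurd rfl h
  | cons c cs => rw [pvChunk3.eq_def]

lemma pvChunk3_ne_nil (v : List Char) (h : v ≠ []) : pvChunk3 v ≠ [] := by
  rw [pvChunk3_cons v h]; simp

lemma pvRange3_nil (a b : Int) (h : b ≤ a) : PySem.List.pyRange a b 3 = [] := by
  rw [PySem.List.pyRange_of_pos a b (by norm_num)]
  rw [if_neg (by omega)]
  simp

lemma pvRange3_cons (a b : Int) (h : a < b) :
    PySem.List.pyRange a b 3 = a :: PySem.List.pyRange (a + 3) b 3 := by
  rw [PySem.List.pyRange_of_pos a b (by norm_num),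
      PySem.List.pyRange_of_pos (a + 3) b (by norm_num)]
  rw [if_pos h]
  by_cases h3 : a + 3 < b
  · rw [if_pos h3]
    have hcnt : ((b - a + 3 - 1) / 3).toNat = ((b - (a + 3) + 3 - 1) / 3).toNat + 1 := by
      omega
    rw [hcnt, List.range_succ_eq_map, List.map_cons, List.map_map]
    congr 1
    · norm_num
    · congr 1
      funext k
      simp [Function.comp]
      ring
  · rw [if_neg h3]
    have hcnt : ((b - a + 3 - 1) / 3).toNat = 1 := by omega
    rw [hcnt]
    simp

/-- A's slice comprehension, started at offset `a`, chunks `v.drop a`. -/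
lemma pvChunksAux (v : List Char) (a : Nat) :
    (PySem.List.pyRange (a : Int) (v.length : Int) 3).map
      (fun i => PySem.List.slice v (some i) (some (i + 3))) = pvChunk3 (v.drop a) := by
  by_cases h : v.length ≤ a
  · rw [pvRange3_nil _ _ (by exact_mod_cast h)]
    rw [List.drop_eq_nil_of_le h, pvChunk3_nil]
    rfl
  · rw [pvRange3_cons _ _ (by exact_mod_cast Nat.lt_of_not_le h)]
    rw [List.map_cons]
    have hhead : PySem.List.slice v (some (a : Int)) (some ((a : Int) + 3)) = (v.drop a).take 3 := by
      have := PySem.List.slice_natCast_add v a 3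
      simpa using this
    have hcast : ((a : Int) + 3) = ((a + 3 : Nat) : Int) := by push_cast; ring
    rw [hhead, hcast, pvChunksAux v (a + 3)]
    rw [pvChunk3_cons (v.drop a) (by intro hnil; apply h; simpa using List.drop_eq_nil_iff.mp hnil)]
    congr 2
    rw [List.drop_drop, Nat.add_comm]
termination_by v.length - a
decreasing_by omega

/-- The flattened contribution of flushing a token. -/
def pvGroup (v : List Char) : List Char := PySem.Chars.join ['-'] (pvChunk3 v)

lemma pvFlushA_flatten (v : List Char) : (pvFlushA v).flatten = pvGroup v := by
  unfold pvFlushA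
  by_cases h : v = []
  · subst h; simp [pvGroup, pvChunk3_nil, PySem.Chars.join, List.intercalate]
  · rw [if_neg h]
    have := pvChunksAux v 0
    simp only [Int.natCast_zero, List.drop_zero] at this
    rw [this]
    simp [pvGroup]

lemma pvJoin_cons (x : List Char) (rest : List (List Char)) (h : rest ≠ []) :
    PySem.Chars.join ['-'] (x :: rest) = x ++ ['-'] ++ PySem.Chars.join ['-'] rest := by
  cases rest with
  | nil => exact absurd rfl h
  | cons y l => simp [PySem.Chars.join, List.intercalate, List.intersperse]

/-- Appending one non-space char to the run: the inline-counter rule. -/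
lemma pvGroup_snoc (v : List Char) (c : Char) :
    pvGroup (v ++ [c]) = pvGroup v ++ (if 0 < v.length ∧ v.length % 3 = 0 then ['-', c] else [c]) := by
  by_cases h0 : v = []
  · subst h0
    simp [pvGroup, pvChunk3_singleton, pvChunk3_nil, PySem.Chars.join, List.intercalate]
  · by_cases h3 : v.length ≤ 3
    · -- one chunk, possibly filled exactly
      have hvlen : 0 < v.length := List.length_pos_of_ne_nil h0
      by_cases hfull : v.length = 3
      · -- v is a full chunk: new chunk list is [v, [c]]
        have h1 : pvChunk3 (v ++ [c]) = v :: pvChunk3 [c] := by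
          rw [pvChunk3_cons (v ++ [c]) (by simp)]
          congr 1
          · rw [List.take_append_of_le_length (by omega)]
            exact List.take_of_length_le (by omega)
          · congr 1
            rw [List.drop_append_of_le_length (by omega)]
            rw [List.drop_eq_nil_of_le (by omega)]
            rfl
        have h2 : pvChunk3 v = [v] := by
          rw [pvChunk3_cons v h0, List.take_of_length_le (by omega),
              List.drop_eq_nil_of_le (by omega), pvChunk3_nil]
        rw [pvGroup, pvGroup, h1, h2, if_pos ⟨hvlen, by omega⟩]
        rw [pvJoin_cons v (pvChunk3 [c]) (pvChunk3_ne_nil [c] (by simp))]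
        simp [pvChunk3_singleton, PySem.Chars.join, List.intercalate]
      · -- short run (length 1 or 2): still one chunk
        have h1 : pvChunk3 (v ++ [c]) = [v ++ [c]] := by
          rw [pvChunk3_cons (v ++ [c]) (by simp), List.take_of_length_le (by simp; omega),
              List.drop_eq_nil_of_le (by simp; omega), pvChunk3_nil]
        have h2 : pvChunk3 v = [v] := by
          rw [pvChunk3_cons v h0, List.take_of_length_le (by omega),
              List.drop_eq_nil_of_le (by omega), pvChunk3_nil]
        rw [pvGroup, pvGroup, h1, h2, if_neg (by omega)]
        simp [PySem.Chars.join, List.intercalate]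
    · -- long run: first chunk of 3 splits off on both sides
      have hgt : 3 < v.length := Nat.lt_of_not_le h3
      have hdropne : v.drop 3 ≠ [] := by
        intro hnil
        have := List.drop_eq_nil_iff.mp hnil
        omega
      have h1 : pvChunk3 (v ++ [c]) = v.take 3 :: pvChunk3 (v.drop 3 ++ [c]) := by
        rw [pvChunk3_cons (v ++ [c]) (by simp)]
        congr 1
        · rw [List.take_append_of_le_length (by omega)]
        · congr 1
          rw [List.drop_append_of_le_length (by omega)]
      have h2 : pvChunk3 v = v.take 3 :: pvChunk3 (v.drop 3) := pvChunk3_cons v h0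
      rw [pvGroup, h1,
          pvJoin_cons _ _ (pvChunk3_ne_nil _ (by simp)),
          pvGroup, h2,
          pvJoin_cons _ _ (pvChunk3_ne_nil _ hdropne)]
      have hIH := pvGroup_snoc (v.drop 3) c
      rw [pvGroup, pvGroup] at hIH
      rw [hIH]
      have hmod : ((0 < (v.drop 3).length ∧ (v.drop 3).length % 3 = 0) ↔ (0 < v.length ∧ v.length % 3 = 0)) := by
        simp only [List.length_drop]
        omega
      by_cases hc : 0 < v.length ∧ v.length % 3 = 0
      · rw [if_pos (hmod.mpr hc), if_pos hc]; simp
      · rw [if_neg (fun h => hc (hmod.mp h)), if_neg hc]; simp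
termination_by v.length
decreasing_by simp; omega

/-- Loop invariant: A's (parts, token) state corresponds to B's (emitted chars, counter). -/
lemma pvLoop_eq (cs : List Char) : ∀ (parts : List (List Char)) (token : List Char),
    ((cs.foldl pvStepA (parts, token)).1 ++ pvFlushA (cs.foldl pvStepA (parts, token)).2).flatten
      = (cs.foldl pvStepB ((parts ++ pvFlushA token).flatten, token.length)).1 := by
  induction cs with
  | nil => intro parts token; simp
  | cons c cs ih =>
    intro parts token
    by_cases hsp : PySem.Chars.isspace c = true
    · have hA : pvStepA (parts, token) c = (parts ++ pvFlushA token ++ [[c]], []) := by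
        simp [pvStepA, hsp]
      have hB : pvStepB ((parts ++ pvFlushA token).flatten, token.length) c
          = ((parts ++ pvFlushA token).flatten ++ [c], 0) := by
        simp [pvStepB, hsp]
      rw [List.foldl_cons, List.foldl_cons, hA, hB, ih]
      congr 1
      simp [pvFlushA]
    · have hA : pvStepA (parts, token) c = (parts, token ++ [c]) := by
        simp [pvStepA, hsp]
      have hB : pvStepB ((parts ++ pvFlushA token).flatten, token.length) c
          = ((parts ++ pvFlushA token).flatten
              ++ (if 0 < token.length ∧ token.length % 3 = 0 then ['-', c] else [c]),
             token.length + 1) := by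
        simp [pvStepB, hsp]
      rw [List.foldl_cons, List.foldl_cons, hA, hB, ih]
      have hinit : ((parts ++ pvFlushA (token ++ [c])).flatten, (token ++ [c]).length)
          = ((parts ++ pvFlushA token).flatten
              ++ (if 0 < token.length ∧ token.length % 3 = 0 then ['-', c] else [c]),
             token.length + 1) := by
        simp [List.flatten_append, pvFlushA_flatten, pvGroup_snoc, List.append_assoc]
      rw [hinit]

-- ===== VERDICT (by name: the statement is the Claim_ definition above) =====
theorem obfuscate_preserving_structure_py_spec : Claim_equal_obfuscate_preserving_structure_py := by
  intro text _
  unfold Spec_obfuscate_preserving_structure_py obfuscate_preserving_structure_py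
        obfuscate_preserving_structure_py_alt
  by_cases h : text = ""
  · subst h; rfl
  · rw [if_neg h]
    show String.ofList ((text.toList.foldl pvStepA ([], [])).1
          ++ pvFlushA (text.toList.foldl pvStepA ([], [])).2).flatten
        = String.ofList (text.toList.foldl pvStepB ([], 0)).1
    congr 1
    have := pvLoop_eq text.toList [] []
    simp only [List.nil_append, pvFlushA_nil, List.flatten_nil, List.length_nil] at this
    exact this
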